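-- pv_equiv track=rewrite | github.com/Elliot-Roberts/google-foobar | challenge_7/all_code.py | get_if_down
-- ===== SOURCE A (Python) =====
-- def get_if_down(num):
--     num -= 1
--
--     ops = 0
--
--     while num > 1:
--         if num % 2 == 0:
--             num //= 2
--         else:
--             num -= 1
--         ops += 1
--     return ops
-- ===== SOURCE B (Python) =====
-- def get_if_down(num):
--     n = num - 1
--     if n <= 1:
--         return 0
--     return (n.bit_length() - 1) + (bin(n).count('1') - 1)
-- ===== Notes on version B (the rewrite author's own statement) =====
-- stated objective: simpler
-- what changed: Replaces the halve/decrement loop with the closed form (bit_length-1)+(popcount-1) of num-1, read off directly from the bits instead of iterating.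
import Mathlib
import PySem

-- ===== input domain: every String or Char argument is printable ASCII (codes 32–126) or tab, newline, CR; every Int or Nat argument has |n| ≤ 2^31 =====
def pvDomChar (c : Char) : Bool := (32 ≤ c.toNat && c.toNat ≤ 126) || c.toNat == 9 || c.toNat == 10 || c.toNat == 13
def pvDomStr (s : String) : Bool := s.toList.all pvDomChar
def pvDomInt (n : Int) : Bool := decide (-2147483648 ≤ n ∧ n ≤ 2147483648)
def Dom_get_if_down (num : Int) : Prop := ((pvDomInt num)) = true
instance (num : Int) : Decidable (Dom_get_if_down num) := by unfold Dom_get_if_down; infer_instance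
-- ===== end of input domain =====

-- B replaces A's halve/decrement loop with the closed form (bit_length-1)+(popcount-1) of num-1 (objective: simpler, loop-free).

-- ===== PORT A =====
def getIfDownLoop (n : Int) (ops : Int) : Int :=
  if h : n > 1 then
    if PySem.Int.mod n 2 = 0 then getIfDownLoop (PySem.Int.floordiv n 2) (ops + 1)
    else getIfDownLoop (n - 1) (ops + 1)
  else ops
termination_by n.toNat
decreasing_by
  · rw [PySem.Int.floordiv_eq_ediv_of_pos (by norm_num)]; omega
  · omega

def get_if_down (num : Int) : Int := getIfDownLoop (num - 1) 0

-- ===== PORT B =====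
def get_if_down_alt (num : Int) : Int :=
  let n := num - 1
  if n ≤ 1 then 0
  else ((PySem.Int.bitLength n : Int) - 1) + ((PySem.Int.bitCount n : Int) - 1)

-- ===== PRECONDITION & SPEC =====
def Spec_get_if_down (num : Int) (out : Int) : Prop := out = get_if_down_alt num
instance (num : Int) (out : Int) : Decidable (Spec_get_if_down num out) := by unfold Spec_get_if_down; infer_instance

-- ===== CLAIM (what is proved, stated in full; the proofs are below) =====
def Claim_equal_get_if_down : Prop := ∀ (num : Int), Dom_get_if_down num → Spec_get_if_down num (get_if_down num)

-- ===== LEMMAS AND PROOFS =====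

theorem getIfDownLoop_closed (k : Nat) : ∀ (n ops : Int), n.toNat = k → 1 < n →
    getIfDownLoop n ops = ops + ((PySem.Int.bitLength n : Int) - 1) + ((PySem.Int.bitCount n : Int) - 1) := by
  induction k using Nat.strong_induction_on with
  | _ k ih =>
    intro n ops hk hn
    rw [getIfDownLoop]
    have h2 : (0:Int) < 2 := by norm_num
    have hmod : PySem.Int.mod n 2 = n % 2 := PySem.Int.mod_eq_emod_of_pos h2
    have hdiv : PySem.Int.floordiv n 2 = n / 2 := PySem.Int.floordiv_eq_ediv_of_pos h2
    have hbl := PySem.Int.bitLength_of_pos (n := n) (by omega)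
    have hbc := PySem.Int.bitCount_of_pos (n := n) (by omega)
    rw [dif_pos hn]
    by_cases he : PySem.Int.mod n 2 = 0
    · rw [if_pos he]
      have hemod : n % 2 = 0 := by rw [← hmod]; exact he
      rw [hdiv]
      by_cases hm : 1 < n / 2
      · rw [ih (n/2).toNat (by omega) (n/2) (ops+1) rfl hm]
        rw [hbl, hbc, hmod, hdiv, hemod]
        push_cast
        omega
      · -- n even, 1 < n, n/2 ≤ 1 ⇒ n = 2
        have hn2 : n = 2 := by omega
        subst hn2
        rw [getIfDownLoop]
        norm_num
        have h1 : PySem.Int.bitLength 2 = 2 := by decide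
        have hc1 : PySem.Int.bitCount 2 = 1 := by decide
        rw [h1, hc1]; push_cast; ring
    · rw [if_neg he]
      have hemod : n % 2 = 1 := by omega
      -- n odd, 1 < n ⇒ n ≥ 3, n - 1 even and > 1
      have hn1 : 1 < n - 1 := by omega
      rw [ih (n-1).toNat (by omega) (n-1) (ops+1) rfl hn1]
      have hbl' := PySem.Int.bitLength_of_pos (n := n - 1) (by omega)
      have hbc' := PySem.Int.bitCount_of_pos (n := n - 1) (by omega)
      have hd' : PySem.Int.floordiv (n-1) 2 = (n-1) / 2 := PySem.Int.floordiv_eq_ediv_of_pos h2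
      have hm' : PySem.Int.mod (n-1) 2 = (n-1) % 2 := PySem.Int.mod_eq_emod_of_pos h2
      have hsame : (n - 1) / 2 = n / 2 := by omega
      rw [hbl, hbc, hbl', hbc', hmod, hdiv, hd', hm', hsame, hemod]
      have : (n - 1) % 2 = 0 := by omega
      rw [this]
      push_cast
      omega

-- ===== VERDICT (by name: the statement is the Claim_ definition above) =====
theorem get_if_down_spec : Claim_equal_get_if_down := by
  intro num _
  unfold Spec_get_if_down get_if_down get_if_down_alt
  by_cases h : num - 1 ≤ 1
  · rw [getIfDownLoop]
    simp [h, show ¬ (1 < num - 1) by omega]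
  · rw [getIfDownLoop_closed (num - 1).toNat (num - 1) 0 rfl (by omega)]
    simp [h]
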